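-- pv_equiv track=rewrite | github.com/Andeser-rgb/Esercizi-PA | graphs/problema06.py | can_remove
-- ===== SOURCE A (Python) =====
-- from collections import deque
--
-- def can_remove(graph: list[list[int]]) -> bool:
--     if len(graph) == 0:
--         return False
--
--     queue = deque()
--     queue.append((None, 0))
--     visited = [False] * len(graph)
--     visited_num = 0
--     cycle = False
--
--     while not (len(queue) == 0):
--         prev, el = queue.popleft()
--         if visited[el]:
--             cycle = True
--             continue
--         visited[el] = True
--         visited_num += 1
--         for child in graph[el]:
--             if child == prev:
--                 continue
--             queue.append((el, child))
--     return cycle and (visited_num == len(graph))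
-- ===== SOURCE B (Python) =====
-- def can_remove(graph: list[list[int]]) -> bool:
--     # Recursive DFS instead of A's FIFO-queue BFS: explore the component of
--     # vertex 0 depth-first, flagging a cycle whenever a non-parent edge hits
--     # an already visited vertex, then test that every vertex was reached.
--     if len(graph) == 0:
--         return False
--
--     visited = [False] * len(graph)
--     state = [0, False]  # visited count, cycle flag
--
--     def dfs(prev, node):
--         visited[node] = True
--         state[0] += 1
--         for child in graph[node]:
--             if child == prev:
--                 continue
--             if visited[child]:
--                 state[1] = True
--             else:
--                 dfs(node, child)
--
--     dfs(None, 0)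
--     return state[1] and state[0] == len(graph)
-- ===== Notes on version B (the rewrite author's own statement) =====
-- stated objective: alternative
-- what changed: Replaces the explicit FIFO-queue BFS (with pop-time visited/cycle detection) by a recursive depth-first search that marks vertices on entry and flags a cycle when a non-parent edge reaches an already visited vertex; same O(V+E) cost, different traversal order, proved to give the same cycle flag and visit count.
-- outside the precondition, e.g. on can_remove([[], [2]]): A returns False, B returns False; on can_remove([[1], [], [-7]]): A returns False, B returns False
import Mathlib
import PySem

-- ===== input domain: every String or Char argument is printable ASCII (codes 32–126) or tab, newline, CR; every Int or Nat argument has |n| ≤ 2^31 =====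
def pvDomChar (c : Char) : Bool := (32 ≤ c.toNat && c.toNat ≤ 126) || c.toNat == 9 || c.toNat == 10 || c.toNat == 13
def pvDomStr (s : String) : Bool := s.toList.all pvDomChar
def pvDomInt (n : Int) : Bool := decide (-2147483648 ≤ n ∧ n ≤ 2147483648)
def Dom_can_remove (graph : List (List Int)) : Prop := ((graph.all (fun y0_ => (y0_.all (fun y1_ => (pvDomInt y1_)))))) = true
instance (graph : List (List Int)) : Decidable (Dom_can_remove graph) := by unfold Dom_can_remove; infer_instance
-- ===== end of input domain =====

-- B replaces A's FIFO-queue BFS by a recursive DFS (marking on entry, cycle flag on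
-- non-parent edges into visited vertices); same return value, different traversal.

-- ===== PORT A =====
-- pushes of one BFS step: pairs (el, child) for every child of el different from prev
def pvExt (g : List (List Int)) (prev : Option Int) (el : Int) : List (Option Int × Int) :=
  (((PySem.List.pyGet? g el).getD []).filter (fun c => !(some c == prev))).map
    (fun c => ((some el : Option Int), c))

-- termination helper for the BFS loop: marking a vertex that reads False lowers the False-count
theorem pvCountSetTrue : ∀ (xs : List Bool) (k : Nat), xs[k]? = some false →
    (xs.set k true).count false + 1 = xs.count false := by
  intro xs
  induction xs with
  | nil => intro k h; simp at h
  | cons b t ih =>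
    intro k h
    cases k with
    | zero => simp_all [List.count_cons]
    | succ k =>
      simp only [List.getElem?_cons_succ] at h
      simp [List.count_cons, ← ih k h]
      omega

theorem pvSetDCountLt (vis : List Bool) (el : Int)
    (h : (PySem.List.pyGet? vis el).getD true = false) :
    (PySem.List.pySetD vis el true).count false < vis.count false := by
  unfold PySem.List.pyGet? at h
  cases hidx : PySem.List.pyIdx? vis.length el with
  | none => rw [hidx] at h; simp at h
  | some k =>
    rw [hidx] at h
    simp only [Option.bind_some] at h
    cases hk : vis[k]? with
    | none => rw [hk] at h; simp at h
    | some b =>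
      rw [hk] at h
      simp at h; subst h
      unfold PySem.List.pySetD PySem.List.pySet?
      rw [hidx]
      have := pvCountSetTrue vis k hk
      simp; omega

-- the BFS loop of A: queue of (prev, el) pairs, pop-time visited/cycle test
def bfsA (g : List (List Int)) (queue : List (Option Int × Int)) (vis : List Bool)
    (num : Int) (cyc : Bool) : List Bool × Int × Bool :=
  match queue with
  | [] => (vis, num, cyc)
  | (prev, el) :: rest =>
    if h : ((PySem.List.pyGet? vis el).getD true) = true then
      bfsA g rest vis num true
    else
      bfsA g (rest ++ pvExt g prev el) (PySem.List.pySetD vis el true) (num + 1) cyc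
termination_by (vis.count false, queue.length)
decreasing_by
  · exact Prod.Lex.right _ (by simp)
  · exact Prod.Lex.left _ _ (pvSetDCountLt vis el (by simpa using h))

def can_remove (graph : List (List Int)) : Bool :=
  if graph.length = 0 then false
  else
    let r := bfsA graph [(none, 0)] (List.replicate graph.length false) 0 false
    r.2.2 && (r.2.1 == (graph.length : Int))

-- ===== PORT B =====
-- recursive DFS: mark node, count it, then per child: skip the parent, flag a cycle on a
-- visited child, else recurse.  fuel (= |graph|) only makes the recursion total; it is
-- never exhausted on inputs satisfying Pre_ (each nested call has a freshly marked vertex).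
mutual
def dfsB (g : List (List Int)) (fuel : Nat) (prev : Option Int) (node : Int)
    (vis : List Bool) (cnt : Int) (cyc : Bool) : List Bool × Int × Bool :=
  match fuel with
  | 0 => (vis, cnt, cyc)
  | f + 1 =>
    dfsKids g f prev node ((PySem.List.pyGet? g node).getD [])
      (PySem.List.pySetD vis node true) (cnt + 1) cyc
  termination_by (fuel, 0)

def dfsKids (g : List (List Int)) (fuel : Nat) (prev : Option Int) (node : Int)
    (kids : List Int) (vis : List Bool) (cnt : Int) (cyc : Bool) : List Bool × Int × Bool :=
  match kids with
  | [] => (vis, cnt, cyc)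
  | c :: t =>
    if some c == prev then dfsKids g fuel prev node t vis cnt cyc
    else if (PySem.List.pyGet? vis c).getD true then dfsKids g fuel prev node t vis cnt true
    else
      let r := dfsB g fuel (some node) c vis cnt cyc
      dfsKids g fuel prev node t r.1 r.2.1 r.2.2
  termination_by (fuel, kids.length + 1)
end

def can_remove_alt (graph : List (List Int)) : Bool :=
  if graph.length = 0 then false
  else
    let r := dfsB graph graph.length none 0 (List.replicate graph.length false) 0 false
    r.2.2 && (r.2.1 == (graph.length : Int))

-- ===== PRECONDITION & SPEC =====
-- Pre_ excludes the graphs with an adjacency entry outside [-len(graph), len(graph)):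
-- A raises an IndexError whenever such an entry is reached from vertex 0 (negative
-- in-range entries wrap in Python and are kept inside Pre_).  When every such entry is
-- unreachable from vertex 0, A does return and B returns the same value; those graphs
-- are still excluded because reachability is not a closed-form condition.
def Pre_can_remove (graph : List (List Int)) : Prop :=
  ∀ row ∈ graph, ∀ c ∈ row, PySem.Raise.InRange graph.length c

instance (graph : List (List Int)) : Decidable (Pre_can_remove graph) := by
  unfold Pre_can_remove; infer_instance

def pvWitness_can_remove : List (List Int) := [[1, 2], [0, 2], [-3, 1]]

def Spec_can_remove (graph : List (List Int)) (out : Bool) : Prop := out = can_remove_alt graph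
instance (graph : List (List Int)) (out : Bool) : Decidable (Spec_can_remove graph out) := by
  unfold Spec_can_remove; infer_instance

-- ===== CLAIM (what is proved, stated in full; the proofs are below) =====
def Claim_equal_can_remove : Prop := ∀ (graph : List (List Int)), Dom_can_remove graph →
  Pre_can_remove graph → Spec_can_remove graph (can_remove graph)

-- ===== LEMMAS AND PROOFS =====

-- normalised (wrapped) index of a Python index i into a list of length n
def pvNrm (n : Nat) (i : Int) : Nat := if 0 ≤ i then i.toNat else n - (-i).toNat

-- visited-test exactly as the ports perform it (out of range reads as `true`)
def pvVisN (vis : List Bool) (i : Int) : Bool := (PySem.List.pyGet? vis i).getD true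

-- invariant carried by every pending (prev, el) pair of the BFS queue:
-- el is in range, and prev (when not None) names an already visited vertex
def pvInv (g : List (List Int)) (vis : List Bool) (pend : List (Option Int × Int)) : Prop :=
  ∀ pr ∈ pend, PySem.Raise.InRange g.length pr.2 ∧ ∀ q, pr.1 = some q → pvVisN vis q = true

-- raw targets of the pending pairs whose vertex is still unvisited
def pvClean (vis : List Bool) (pend : List (Option Int × Int)) : List Int :=
  (pend.filter (fun pr => !pvVisN vis pr.2)).map (fun pr => pr.2)

theorem pvIdx_inrange (n : Nat) (i : Int) (h : PySem.Raise.InRange n i) :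
    PySem.List.pyIdx? n i = some (pvNrm n i) := by
  unfold PySem.Raise.InRange at h
  unfold PySem.List.pyIdx? pvNrm
  split_ifs <;> first | rfl | omega

theorem pvNrm_lt (n : Nat) (i : Int) (h : PySem.Raise.InRange n i) : pvNrm n i < n := by
  unfold PySem.Raise.InRange at h
  unfold pvNrm
  split_ifs <;> omega

theorem pvGet_eq {α : Type} (xs : List α) (i : Int) (h : PySem.Raise.InRange xs.length i) :
    PySem.List.pyGet? xs i = xs[pvNrm xs.length i]? := by
  unfold PySem.List.pyGet?
  rw [pvIdx_inrange _ _ h]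
  rfl

theorem pvSetD_eq (vis : List Bool) (i : Int) (v : Bool)
    (h : PySem.Raise.InRange vis.length i) :
    PySem.List.pySetD vis i v = vis.set (pvNrm vis.length i) v := by
  unfold PySem.List.pySetD PySem.List.pySet?
  rw [pvIdx_inrange _ _ h]
  rfl

theorem pvVisN_false_inrange (vis : List Bool) (i : Int) (h : pvVisN vis i = false) :
    PySem.Raise.InRange vis.length i := by
  unfold pvVisN PySem.List.pyGet? at h
  unfold PySem.Raise.InRange
  unfold PySem.List.pyIdx? at h
  split_ifs at h <;> simp_all <;> omega

theorem pvVisN_getElem (vis : List Bool) (i : Int) (h : PySem.Raise.InRange vis.length i) :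
    pvVisN vis i = (vis[pvNrm vis.length i]?).getD true := by
  unfold pvVisN
  rw [pvGet_eq _ _ h]

theorem pvVisN_set (vis : List Bool) (ν : Nat) (i : Int)
    (h : PySem.Raise.InRange vis.length i) :
    pvVisN (vis.set ν true) i = if pvNrm vis.length i = ν then true else pvVisN vis i := by
  have hlen : (vis.set ν true).length = vis.length := by simp
  have h' : PySem.Raise.InRange (vis.set ν true).length i := by rw [hlen]; exact h
  rw [pvVisN_getElem _ _ h', pvVisN_getElem _ _ h, hlen]
  rw [List.getElem?_set]
  have hlt := pvNrm_lt _ _ h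
  by_cases he : ν = pvNrm vis.length i
  · subst he; simp [hlt]
  · simp [he, Ne.symm he]

theorem pvVisN_set_mono (vis : List Bool) (ν : Nat) (i : Int) (h : pvVisN vis i = true) :
    pvVisN (vis.set ν true) i = true := by
  by_cases hr : PySem.Raise.InRange vis.length i
  · rw [pvVisN_set _ _ _ hr]
    split_ifs <;> simp [h]
  · unfold pvVisN PySem.List.pyGet? at h ⊢
    have : PySem.List.pyIdx? (vis.set ν true).length i = PySem.List.pyIdx? vis.length i := by simp
    rw [this]
    cases hidx : PySem.List.pyIdx? vis.length i with
    | none => simp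
    | some k =>
      exfalso
      unfold PySem.Raise.InRange at hr
      unfold PySem.List.pyIdx? at hidx
      split_ifs at hidx <;> omega

theorem pvVisN_pySetD_mono (vis : List Bool) (j i : Int) (h : pvVisN vis i = true) :
    pvVisN (PySem.List.pySetD vis j true) i = true := by
  unfold PySem.List.pySetD PySem.List.pySet?
  cases hidx : PySem.List.pyIdx? vis.length j with
  | none => simpa
  | some k => simpa using pvVisN_set_mono vis k i h

-- a fresh mark: the write is a List.set at the normalised index, which read `false`
theorem pvFreshSpec (vis : List Bool) (i : Int) (h : pvVisN vis i = false) :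
    PySem.List.pySetD vis i true = vis.set (pvNrm vis.length i) true ∧
    vis[pvNrm vis.length i]? = some false := by
  have hr := pvVisN_false_inrange vis i h
  refine ⟨pvSetD_eq vis i true hr, ?_⟩
  rw [pvVisN_getElem _ _ hr] at h
  cases hk : vis[pvNrm vis.length i]? with
  | none => rw [hk] at h; simp at h
  | some b => rw [hk] at h; simp at h; rw [h]

theorem pvFresh_count (vis : List Bool) (i : Int) (h : pvVisN vis i = false) :
    (PySem.List.pySetD vis i true).count false + 1 = vis.count false := by
  obtain ⟨h1, h2⟩ := pvFreshSpec vis i h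
  rw [h1]
  exact pvCountSetTrue _ _ h2

theorem pvVisN_mark_self (vis : List Bool) (i : Int)
    (h : PySem.Raise.InRange vis.length i) :
    pvVisN (PySem.List.pySetD vis i true) i = true := by
  rw [pvSetD_eq _ _ _ h, pvVisN_set _ _ _ h]
  simp

theorem pvSetD_length (vis : List Bool) (i : Int) (v : Bool) :
    (PySem.List.pySetD vis i v).length = vis.length := by
  unfold PySem.List.pySetD PySem.List.pySet?
  cases PySem.List.pyIdx? vis.length i <;> simp

theorem pvSetD_count_le (vis : List Bool) (i : Int) :
    (PySem.List.pySetD vis i true).count false ≤ vis.count false := by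
  unfold PySem.List.pySetD PySem.List.pySet?
  cases hidx : PySem.List.pyIdx? vis.length i with
  | none => simp
  | some k =>
    simp only [Option.map_some, Option.getD_some]
    clear hidx
    induction vis generalizing k with
    | nil => simp
    | cons b t ih =>
      cases k with
      | zero => cases b <;> simp [List.count_cons]
      | succ k => simp only [List.set_cons_succ, List.count_cons]; have := ih k; omega

-- unfolding lemmas for the two loops
theorem bfsA_nil (g : List (List Int)) (vis : List Bool) (num : Int) (cyc : Bool) :
    bfsA g [] vis num cyc = (vis, num, cyc) := by
  rw [bfsA]

theorem bfsA_vis (g : List (List Int)) (p : Option Int) (el : Int)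
    (rest : List (Option Int × Int)) (vis : List Bool) (num : Int) (cyc : Bool)
    (h : pvVisN vis el = true) :
    bfsA g ((p, el) :: rest) vis num cyc = bfsA g rest vis num true := by
  rw [bfsA]
  unfold pvVisN at h
  simp [h]

theorem bfsA_fresh (g : List (List Int)) (p : Option Int) (el : Int)
    (rest : List (Option Int × Int)) (vis : List Bool) (num : Int) (cyc : Bool)
    (h : pvVisN vis el = false) :
    bfsA g ((p, el) :: rest) vis num cyc
      = bfsA g (rest ++ pvExt g p el) (PySem.List.pySetD vis el true) (num + 1) cyc := by
  rw [bfsA]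
  unfold pvVisN at h
  simp [h]

theorem dfsB_succ (g : List (List Int)) (f : Nat) (p : Option Int) (e : Int)
    (vis : List Bool) (cnt : Int) (cyc : Bool) :
    dfsB g (f + 1) p e vis cnt cyc
      = dfsKids g f p e ((PySem.List.pyGet? g e).getD [])
          (PySem.List.pySetD vis e true) (cnt + 1) cyc := by
  rw [dfsB]

theorem dfsKids_nil (g : List (List Int)) (f : Nat) (p : Option Int) (e : Int)
    (vis : List Bool) (cnt : Int) (cyc : Bool) :
    dfsKids g f p e [] vis cnt cyc = (vis, cnt, cyc) := by
  rw [dfsKids]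

theorem dfsKids_skip (g : List (List Int)) (f : Nat) (p : Option Int) (e c : Int)
    (t : List Int) (vis : List Bool) (cnt : Int) (cyc : Bool) (h : some c = p) :
    dfsKids g f p e (c :: t) vis cnt cyc = dfsKids g f p e t vis cnt cyc := by
  rw [dfsKids]
  simp [h]

theorem dfsKids_vis (g : List (List Int)) (f : Nat) (p : Option Int) (e c : Int)
    (t : List Int) (vis : List Bool) (cnt : Int) (cyc : Bool) (h : ¬ some c = p)
    (hv : pvVisN vis c = true) :
    dfsKids g f p e (c :: t) vis cnt cyc = dfsKids g f p e t vis cnt true := by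
  rw [dfsKids]
  unfold pvVisN at hv
  simp [h, hv]

theorem dfsKids_rec (g : List (List Int)) (f : Nat) (p : Option Int) (e c : Int)
    (t : List Int) (vis : List Bool) (cnt : Int) (cyc : Bool) (h : ¬ some c = p)
    (hv : pvVisN vis c = false) :
    dfsKids g f p e (c :: t) vis cnt cyc
      = dfsKids g f p e t (dfsB g f (some e) c vis cnt cyc).1
          (dfsB g f (some e) c vis cnt cyc).2.1 (dfsB g f (some e) c vis cnt cyc).2.2 := by
  rw [dfsKids]
  unfold pvVisN at hv
  simp [h, hv]

-- runs consisting solely of already visited targets just set the (already set) flag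
theorem pvJunkPrefix (g : List (List Int)) (j r : List (Option Int × Int))
    (vis : List Bool) (num : Int) (hj : ∀ pr ∈ j, pvVisN vis pr.2 = true) :
    bfsA g (j ++ r) vis num true = bfsA g r vis num true := by
  induction j with
  | nil => rfl
  | cons pr t ih =>
    obtain ⟨p, e⟩ := pr
    rw [List.cons_append, bfsA_vis _ _ _ _ _ _ _ (hj (p, e) (by simp))]
    exact ih (fun pr h => hj pr (by simp [h]))

theorem pvJunkRun (g : List (List Int)) (pend : List (Option Int × Int))
    (vis : List Bool) (num : Int) (hj : ∀ pr ∈ pend, pvVisN vis pr.2 = true) :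
    bfsA g pend vis num true = (vis, num, true) := by
  have := pvJunkPrefix g pend [] vis num hj
  rw [List.append_nil] at this
  rw [this, bfsA_nil]

-- pvClean bookkeeping
theorem pvClean_append (vis : List Bool) (a b : List (Option Int × Int)) :
    pvClean vis (a ++ b) = pvClean vis a ++ pvClean vis b := by
  unfold pvClean
  simp

theorem pvClean_junk_cons (vis : List Bool) (pr : Option Int × Int)
    (t : List (Option Int × Int)) (h : pvVisN vis pr.2 = true) :
    pvClean vis (pr :: t) = pvClean vis t := by
  unfold pvClean
  simp [h]

theorem pvClean_fresh_cons (vis : List Bool) (pr : Option Int × Int)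
    (t : List (Option Int × Int)) (h : pvVisN vis pr.2 = false) :
    pvClean vis (pr :: t) = pr.2 :: pvClean vis t := by
  unfold pvClean
  simp [h]

theorem pvClean_nil_junk (vis : List Bool) (p : List (Option Int × Int))
    (h : pvClean vis p = []) : ∀ pr ∈ p, pvVisN vis pr.2 = true := by
  unfold pvClean at h
  simp only [List.map_eq_nil_iff, List.filter_eq_nil_iff] at h
  intro pr hm
  have := h pr hm
  simpa using this

theorem pvClean_decomp (vis : List Bool) (p : List (Option Int × Int)) (e : Int)
    (rest : List Int) (h : pvClean vis p = e :: rest) :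
    ∃ j q t, p = j ++ q :: t ∧ (∀ pr ∈ j, pvVisN vis pr.2 = true) ∧ q.2 = e ∧
      pvVisN vis q.2 = false ∧ pvClean vis t = rest := by
  induction p with
  | nil => simp [pvClean] at h
  | cons pr t ih =>
    by_cases hv : pvVisN vis pr.2 = true
    · rw [pvClean_junk_cons _ _ _ hv] at h
      obtain ⟨j, q, t', h1, h2, h3, h4, h5⟩ := ih h
      refine ⟨pr :: j, q, t', by simp [h1], ?_, h3, h4, h5⟩
      intro x hx
      rcases List.mem_cons.mp hx with hx | hx
      · rw [hx]; exact hv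
      · exact h2 x hx
    · have hv' : pvVisN vis pr.2 = false := by simpa using hv
      rw [pvClean_fresh_cons _ _ _ hv'] at h
      obtain ⟨he, hr⟩ : pr.2 = e ∧ pvClean vis t = rest := by
        constructor <;> [exact (List.cons.injEq _ _ _ _ ▸ h).1; exact (List.cons.injEq _ _ _ _ ▸ h).2]
      exact ⟨[], pr, t, by simp, by simp, he, hv', hr⟩

-- re-filtering after the visited set grows
theorem pvClean_refine (vis vis' : List Bool) (p : List (Option Int × Int))
    (hmono : ∀ q, pvVisN vis q = true → pvVisN vis' q = true) :
    pvClean vis' p = (pvClean vis p).filter (fun c => !pvVisN vis' c) := by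
  induction p with
  | nil => rfl
  | cons pr t ih =>
    by_cases hv : pvVisN vis pr.2 = true
    · rw [pvClean_junk_cons _ _ _ hv, pvClean_junk_cons _ _ _ (hmono _ hv), ih]
    · have hv' : pvVisN vis pr.2 = false := by simpa using hv
      rw [pvClean_fresh_cons _ _ _ hv']
      by_cases hw : pvVisN vis' pr.2 = true
      · rw [pvClean_junk_cons _ _ _ hw, ih]
        simp [hw]
      · have hw' : pvVisN vis' pr.2 = false := by simpa using hw
        rw [pvClean_fresh_cons _ _ _ hw', ih]
        simp [hw']

-- invariant bookkeeping
theorem pvInv_subset (g : List (List Int)) (vis : List Bool)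
    (a b : List (Option Int × Int)) (hsub : ∀ x ∈ a, x ∈ b) (h : pvInv g vis b) :
    pvInv g vis a := fun pr hm => h pr (hsub pr hm)

theorem pvInv_mono (g : List (List Int)) (vis vis' : List Bool)
    (pend : List (Option Int × Int))
    (hm : ∀ q, pvVisN vis q = true → pvVisN vis' q = true) (h : pvInv g vis pend) :
    pvInv g vis' pend := by
  intro pr hmem
  obtain ⟨hr, hp⟩ := h pr hmem
  exact ⟨hr, fun q hq => hm q (hp q hq)⟩

theorem pvInv_append (g : List (List Int)) (vis : List Bool)
    (a b : List (Option Int × Int)) (ha : pvInv g vis a) (hb : pvInv g vis b) :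
    pvInv g vis (a ++ b) := by
  intro pr hm
  rcases List.mem_append.mp hm with h | h
  · exact ha pr h
  · exact hb pr h

-- adjacency rows: membership and range of children
theorem pvRow_range (g : List (List Int)) (e : Int) (hpre : Pre_can_remove g)
    (he : PySem.Raise.InRange g.length e) :
    ∀ c ∈ (PySem.List.pyGet? g e).getD [], PySem.Raise.InRange g.length c := by
  intro c hc
  cases hrow : PySem.List.pyGet? g e with
  | none => rw [hrow] at hc; simp at hc
  | some row =>
    rw [hrow] at hc
    exact hpre row (PySem.List.mem_of_pyGet?_eq_some g hrow) c hc

theorem pvRow_nrm (g : List (List Int)) (e e' : Int)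
    (he : PySem.Raise.InRange g.length e) (he' : PySem.Raise.InRange g.length e')
    (hn : pvNrm g.length e = pvNrm g.length e') :
    (PySem.List.pyGet? g e).getD [] = (PySem.List.pyGet? g e').getD [] := by
  rw [pvGet_eq _ _ he, pvGet_eq _ _ he', hn]

theorem pvInv_ext (g : List (List Int)) (vis : List Bool) (p : Option Int) (e : Int)
    (hpre : Pre_can_remove g) (hlen : vis.length = g.length)
    (he : PySem.Raise.InRange g.length e) :
    pvInv g (PySem.List.pySetD vis e true) (pvExt g p e) := by
  intro pr hm
  unfold pvExt at hm
  simp only [List.mem_map, List.mem_filter] at hm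
  obtain ⟨c, ⟨hc, -⟩, rfl⟩ := hm
  refine ⟨pvRow_range g e hpre he c hc, ?_⟩
  intro q hq
  cases hq
  exact pvVisN_mark_self vis e (hlen ▸ he)

theorem pvClean_ext (g : List (List Int)) (vis' : List Bool) (p : Option Int) (e : Int)
    (hp : ∀ q, p = some q → pvVisN vis' q = true) :
    pvClean vis' (pvExt g p e)
      = ((PySem.List.pyGet? g e).getD []).filter (fun c => !pvVisN vis' c) := by
  unfold pvClean pvExt
  induction (PySem.List.pyGet? g e).getD [] with
  | nil => rfl
  | cons c t ih =>
    by_cases hc : some c = p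
    · have h1 : (some c == p) = true := by simp [hc]
      have h2 : pvVisN vis' c = true := hp c hc.symm
      simp only [List.filter_cons, h1, h2]
      simpa using ih
    · have h1 : (some c == p) = false := by simp [hc]
      simp only [List.filter_cons, h1]
      by_cases h2 : pvVisN vis' c = true
      · simp only [h2, Bool.not_true, List.map_cons, List.filter_cons]
        simpa [h2] using ih
      · have h2' : pvVisN vis' c = false := by simpa using h2
        simp only [h2', Bool.not_false, List.map_cons, List.filter_cons]
        simpa [h2'] using ih

-- ===== the reordering lemmas for A's BFS loop =====

-- M: once the cycle flag is set, the run is determined by the visited array and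
-- the list of still-unvisited raw targets of the pending pairs.
theorem pvM : ∀ (cf L : Nat) (g : List (List Int)) (vis : List Bool)
    (p1 p2 : List (Option Int × Int)) (num : Int),
    Pre_can_remove g → vis.length = g.length → pvInv g vis p1 → pvInv g vis p2 →
    vis.count false = cf → p1.length + p2.length = L →
    pvClean vis p1 = pvClean vis p2 →
    bfsA g p1 vis num true = bfsA g p2 vis num true := by
  intro cf
  induction cf using Nat.strong_induction_on with
  | _ cf IHcf =>
  intro L
  induction L using Nat.strong_induction_on with
  | _ L IHL =>
  intro g vis p1 p2 num hpre hlen h1 h2 hcf hL hcl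
  cases p1 with
  | nil =>
    rw [bfsA_nil, pvJunkRun g p2 vis num (pvClean_nil_junk _ _ (by rw [← hcl]; rfl))]
  | cons pr t1 =>
    obtain ⟨p, e⟩ := pr
    by_cases hv : pvVisN vis e = true
    · rw [bfsA_vis _ _ _ _ _ _ _ hv]
      refine IHL (t1.length + p2.length) (by simp at hL ⊢; omega) g vis t1 p2 num hpre hlen
        (pvInv_subset _ _ _ _ (by intro x hx; simp [hx]) h1) h2 hcf rfl ?_
      rw [← hcl, pvClean_junk_cons _ _ _ hv]
    · have hv' : pvVisN vis e = false := by simpa using hv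
      rw [pvClean_fresh_cons _ _ _ hv'] at hcl
      obtain ⟨j, q, t2, hp2, hj, hq2, hqf, ht2⟩ := pvClean_decomp vis p2 e (pvClean vis t1) hcl.symm
      have hqe : q = (q.1, e) := by rw [← hq2]
      rw [hq2] at hqf
      subst hp2
      rw [pvJunkPrefix g j _ vis num hj, hqe]
      rw [bfsA_fresh _ _ _ _ _ _ _ hv', bfsA_fresh _ _ _ _ _ _ _ hqf]
      have hre : PySem.Raise.InRange g.length e := hlen ▸ pvVisN_false_inrange vis e hv'
      set vis' := PySem.List.pySetD vis e true with hvis'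
      have hmono : ∀ w, pvVisN vis w = true → pvVisN vis' w = true :=
        fun w h => pvVisN_pySetD_mono vis e w h
      have hcnt := pvFresh_count vis e hv'
      rw [← hvis'] at hcnt
      have hlen' : vis'.length = g.length := by rw [hvis', pvSetD_length]; exact hlen
      have h1t : pvInv g vis' t1 :=
        pvInv_mono _ _ _ _ hmono (pvInv_subset _ _ _ _ (by intro x hx; simp [hx]) h1)
      have h2t : pvInv g vis' t2 :=
        pvInv_mono _ _ _ _ hmono (pvInv_subset _ _ _ _ (by intro x hx; simp [hx]) h2)
      have hpv : ∀ w, p = some w → pvVisN vis' w = true := by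
        intro w hw
        exact hmono w ((h1 (p, e) (by simp)).2 w hw)
      have hpv' : ∀ w, q.1 = some w → pvVisN vis' w = true := by
        intro w hw
        exact hmono w ((h2 q (by simp)).2 w hw)
      refine IHcf (vis'.count false) (by omega)
        ((t1 ++ pvExt g p e).length + (t2 ++ pvExt g q.1 e).length)
        g vis' _ _ (num + 1) hpre hlen'
        (pvInv_append _ _ _ _ h1t (pvInv_ext g vis p e hpre hlen hre))
        (pvInv_append _ _ _ _ h2t (pvInv_ext g vis q.1 e hpre hlen hre))
        rfl rfl ?_
      rw [pvClean_append, pvClean_append]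
      rw [pvClean_ext g vis' p e hpv, pvClean_ext g vis' q.1 e hpv']
      rw [pvClean_refine vis vis' t1 hmono, pvClean_refine vis vis' t2 hmono, ht2]

-- E/P: the BFS loop may process any pending pair first (E), hence is invariant
-- under permutations of the queue (P); proved together by induction on
-- (unvisited count, length).
theorem pvEP : ∀ (cf K : Nat),
    (∀ (g : List (List Int)) (vis : List Bool) (l1 : List (Option Int × Int))
        (x : Option Int × Int) (l2 : List (Option Int × Int)) (num : Int) (cyc : Bool),
      Pre_can_remove g → vis.length = g.length → pvInv g vis (l1 ++ x :: l2) →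
      vis.count false = cf → l1.length = K →
      bfsA g (l1 ++ x :: l2) vis num cyc = bfsA g (x :: (l1 ++ l2)) vis num cyc)
    ∧ (∀ (g : List (List Int)) (vis : List Bool) (p1 p2 : List (Option Int × Int))
        (num : Int) (cyc : Bool),
      Pre_can_remove g → vis.length = g.length → pvInv g vis p1 → p1.Perm p2 →
      vis.count false = cf → p1.length = K →
      bfsA g p1 vis num cyc = bfsA g p2 vis num cyc) := by
  intro cf
  induction cf using Nat.strong_induction_on with
  | _ cf IHcf =>
  intro K
  induction K using Nat.strong_induction_on with
  | _ K IHK =>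
  constructor
  · -- E: exchange to front
    intro g vis l1 x l2 num cyc hpre hlen hinv hcf hK
    cases l1 with
    | nil => simp
    | cons a l1' =>
      obtain ⟨pa, ea⟩ := a
      obtain ⟨px, ex⟩ := x
      have hmx : ((px, ex) : Option Int × Int) ∈ ((pa, ea) :: l1') ++ (px, ex) :: l2 := by simp
      have hma : ((pa, ea) : Option Int × Int) ∈ ((pa, ea) :: l1') ++ (px, ex) :: l2 := by simp
      have hinv' : pvInv g vis (l1' ++ (px, ex) :: l2) :=
        pvInv_subset _ _ _ _ (by intro y hy; rcases List.mem_append.mp hy with h | h <;> simp [h]) hinv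
      by_cases hva : pvVisN vis ea = true
      · rw [List.cons_append, bfsA_vis _ _ _ _ _ _ _ hva]
        rw [(IHK l1'.length (by simp at hK; omega)).1 g vis l1' (px, ex) l2 num true hpre hlen hinv' hcf rfl]
        by_cases hvx : pvVisN vis ex = true
        · rw [bfsA_vis _ _ _ _ _ _ _ hvx, bfsA_vis _ _ _ _ _ _ _ hvx, List.cons_append,
            bfsA_vis _ _ _ _ _ _ _ hva]
        · have hvx' : pvVisN vis ex = false := by simpa using hvx
          rw [bfsA_fresh _ _ _ _ _ _ _ hvx', bfsA_fresh _ _ _ _ _ _ _ hvx']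
          rw [List.cons_append, List.cons_append,
            bfsA_vis _ _ _ _ _ _ _ (pvVisN_pySetD_mono vis ex ea hva)]
      · have hva' : pvVisN vis ea = false := by simpa using hva
        have hrea : PySem.Raise.InRange vis.length ea := pvVisN_false_inrange vis ea hva'
        rw [List.cons_append, bfsA_fresh _ _ _ _ _ _ _ hva']
        have hinvEa : pvInv g vis ((pa, ea) :: (l1' ++ (px, ex) :: l2)) := by
          simpa using hinv
        have hinva : pvInv g (PySem.List.pySetD vis ea true)
            (l1' ++ (px, ex) :: (l2 ++ pvExt g pa ea)) := by
          refine pvInv_subset _ _ _ ((l1' ++ (px, ex) :: l2) ++ pvExt g pa ea)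
            (by intro y hy; simp at hy ⊢; tauto) ?_
          exact pvInv_append _ _ _ _
            (pvInv_mono _ _ _ _ (fun w h => pvVisN_pySetD_mono vis ea w h) hinv')
            (pvInv_ext g vis pa ea hpre hlen (hlen ▸ hrea))
        have hcnta := pvFresh_count vis ea hva'
        have hlena : (PySem.List.pySetD vis ea true).length = vis.length := pvSetD_length _ _ _
        have hE1 := (IHcf ((PySem.List.pySetD vis ea true).count false) (by omega) l1'.length).1
          g (PySem.List.pySetD vis ea true) l1' (px, ex) (l2 ++ pvExt g pa ea) (num + 1) cyc
          hpre (by rw [hlena]; exact hlen) hinva rfl rfl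
        rw [show (l1' ++ (px, ex) :: l2) ++ pvExt g pa ea
              = l1' ++ (px, ex) :: (l2 ++ pvExt g pa ea) by simp, hE1]
        by_cases hvx : pvVisN vis ex = true
        · rw [bfsA_vis _ _ _ _ _ _ _ (pvVisN_pySetD_mono vis ea ex hvx),
            bfsA_vis _ _ _ _ _ _ _ hvx, List.cons_append, bfsA_fresh _ _ _ _ _ _ _ hva']
          simp [List.append_assoc]
        · have hvx' : pvVisN vis ex = false := by simpa using hvx
          have hrex : PySem.Raise.InRange vis.length ex := pvVisN_false_inrange vis ex hvx'
          have hseta : PySem.List.pySetD vis ea true = vis.set (pvNrm vis.length ea) true :=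
            pvSetD_eq _ _ _ hrea
          have hsetx : PySem.List.pySetD vis ex true = vis.set (pvNrm vis.length ex) true :=
            pvSetD_eq _ _ _ hrex
          by_cases hcl : pvNrm vis.length ex = pvNrm vis.length ea
          · -- clash: ex and ea name the same vertex
            have hvxa : pvVisN (PySem.List.pySetD vis ea true) ex = true := by
              rw [hseta, pvVisN_set _ _ _ hrex, if_pos hcl]
            have hvae : pvVisN (PySem.List.pySetD vis ex true) ea = true := by
              rw [hsetx, pvVisN_set _ _ _ hrea, if_pos hcl.symm]
            rw [bfsA_vis _ _ _ _ _ _ _ hvxa, bfsA_fresh _ _ _ _ _ _ _ hvx']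
            try simp only [List.cons_append]
            rw [bfsA_vis _ _ _ _ _ _ _ hvae]
            have hsame : PySem.List.pySetD vis ex true = PySem.List.pySetD vis ea true := by
              rw [hseta, hsetx, hcl]
            rw [hsame]
            -- both runs continue with cyc = true from the same state; apply pvM
            have hmono : ∀ w, pvVisN vis w = true →
                pvVisN (PySem.List.pySetD vis ea true) w = true :=
              fun w h => pvVisN_pySetD_mono vis ea w h
            have hpa : ∀ w, pa = some w → pvVisN (PySem.List.pySetD vis ea true) w = true :=
              fun w hw => hmono w ((hinv _ hma).2 w hw)
            have hpx : ∀ w, px = some w → pvVisN (PySem.List.pySetD vis ea true) w = true :=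
              fun w hw => hmono w ((hinv _ hmx).2 w hw)
            refine pvM ((PySem.List.pySetD vis ea true).count false) _ g _
              (l1' ++ (l2 ++ pvExt g pa ea)) ((l1' ++ l2) ++ pvExt g px ex) (num + 1)
              hpre (by rw [hlena]; exact hlen) ?_ ?_ rfl rfl ?_
            · refine pvInv_subset _ _ _ ((l1' ++ (px, ex) :: l2) ++ pvExt g pa ea)
                (by intro y hy; simp at hy ⊢; tauto) ?_
              exact pvInv_append _ _ _ _
                (pvInv_mono _ _ _ _ hmono hinv')
                (pvInv_ext g vis pa ea hpre hlen (hlen ▸ hrea))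
            · refine pvInv_append _ _ _ _ ?_ ?_
              · refine pvInv_mono _ _ _ _ hmono ?_
                exact pvInv_subset _ _ _ _ (by intro y hy; simp at hy ⊢; tauto) hinv'
              · have := pvInv_ext g vis px ex hpre hlen (hlen ▸ hrex)
                rw [hsame] at this
                exact this
            · rw [pvClean_append, pvClean_append, pvClean_append]
              rw [pvClean_ext g _ pa ea hpa, pvClean_ext g _ px ex hpx]
              rw [pvRow_nrm g ea ex (hlen ▸ hrea) (hlen ▸ hrex) (by rw [← hlen]; exact hcl.symm)]
              simp [pvClean_append, List.append_assoc]
          · -- no clash: the two fresh pops commute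
            have hvxa : pvVisN (PySem.List.pySetD vis ea true) ex = false := by
              rw [hseta, pvVisN_set _ _ _ hrex, if_neg hcl]; exact hvx'
            have hvae : pvVisN (PySem.List.pySetD vis ex true) ea = false := by
              rw [hsetx, pvVisN_set _ _ _ hrea, if_neg (fun h => hcl h.symm)]; exact hva'
            rw [bfsA_fresh _ _ _ _ _ _ _ hvxa, bfsA_fresh _ _ _ _ _ _ _ hvx']
            try simp only [List.cons_append]
            rw [bfsA_fresh _ _ _ _ _ _ _ hvae]
            -- the two marked arrays coincide
            have hlx : (PySem.List.pySetD vis ex true).length = vis.length := pvSetD_length _ _ _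
            have hswap : PySem.List.pySetD (PySem.List.pySetD vis ea true) ex true
                = PySem.List.pySetD (PySem.List.pySetD vis ex true) ea true := by
              rw [pvSetD_eq (PySem.List.pySetD vis ea true) ex true (by rw [hlena]; exact hrex),
                pvSetD_eq (PySem.List.pySetD vis ex true) ea true (by rw [hlx]; exact hrea),
                hseta, hsetx]
              simp only [List.length_set]
              exact List.set_comm _ _ (fun h => hcl h.symm)
            rw [← hswap]
            -- permutation of the two appended push lists
            have hcnt2 : (PySem.List.pySetD (PySem.List.pySetD vis ea true) ex true).count false
                + 1 = (PySem.List.pySetD vis ea true).count false :=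
              pvFresh_count _ _ hvxa
            have hlen2 : (PySem.List.pySetD (PySem.List.pySetD vis ea true) ex true).length
                = g.length := by rw [pvSetD_length, hlena]; exact hlen
            have hmono2 : ∀ w, pvVisN vis w = true →
                pvVisN (PySem.List.pySetD (PySem.List.pySetD vis ea true) ex true) w = true :=
              fun w h => pvVisN_pySetD_mono _ _ _ (pvVisN_pySetD_mono vis ea w h)
            refine (IHcf ((PySem.List.pySetD (PySem.List.pySetD vis ea true) ex true).count false)
              (by omega) ((l1' ++ (l2 ++ pvExt g pa ea)) ++ pvExt g px ex).length).2 g _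
              ((l1' ++ (l2 ++ pvExt g pa ea)) ++ pvExt g px ex)
              (((l1' ++ l2) ++ pvExt g px ex) ++ pvExt g pa ea)
              (num + 1 + 1) cyc hpre hlen2 ?_ ?_ rfl ?_
            · refine pvInv_append _ _ _ _ ?_ ?_
              · refine pvInv_subset _ _ _ ((l1' ++ (px, ex) :: l2) ++ pvExt g pa ea)
                  (by intro y hy; simp at hy ⊢; tauto) ?_
                refine pvInv_append _ _ _ _ ?_ ?_
                · exact pvInv_mono _ _ _ _ hmono2 hinv'
                · refine pvInv_mono _ _ _ _
                    (fun w h => pvVisN_pySetD_mono _ _ _ h) ?_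
                  exact pvInv_ext g vis pa ea hpre hlen (hlen ▸ hrea)
              · exact pvInv_ext g (PySem.List.pySetD vis ea true) px ex hpre
                  (by rw [hlena]; exact hlen) (hlen ▸ hrex)
            · have h1 : ((l1' ++ (l2 ++ pvExt g pa ea)) ++ pvExt g px ex).Perm
                  ((l1' ++ l2) ++ (pvExt g pa ea ++ pvExt g px ex)) := by
                simp [List.append_assoc]
              have h2 : ((l1' ++ l2) ++ (pvExt g pa ea ++ pvExt g px ex)).Perm
                  ((l1' ++ l2) ++ (pvExt g px ex ++ pvExt g pa ea)) :=
                List.Perm.append_left _ (List.perm_append_comm)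
              have h3 : ((l1' ++ l2) ++ (pvExt g px ex ++ pvExt g pa ea)).Perm
                  (((l1' ++ l2) ++ pvExt g px ex) ++ pvExt g pa ea) := by
                simp [List.append_assoc]
              exact (h1.trans h2).trans h3
            · rfl
  · -- P: invariance under permutation
    intro g vis p1 p2 num cyc hpre hlen hinv hperm hcf hK
    cases p1 with
    | nil =>
      rw [List.Perm.eq_nil hperm.symm]
    | cons x t =>
      have hx2 : x ∈ p2 := hperm.mem_iff.mp (by simp)
      obtain ⟨l1, l2, rfl⟩ := List.append_of_mem hx2
      have hpermt : t.Perm (l1 ++ l2) := (hperm.trans List.perm_middle).cons_inv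
      have hinv2 : pvInv g vis (l1 ++ x :: l2) :=
        pvInv_subset _ _ _ _ (fun y hy => hperm.mem_iff.mpr hy) hinv
      have hlt : l1.length < K := by
        have := hperm.length_eq
        simp at this hK
        omega
      rw [(IHK l1.length hlt).1 g vis l1 x l2 num cyc hpre hlen hinv2 hcf rfl]
      obtain ⟨px, ex⟩ := x
      have hinvt : pvInv g vis t :=
        pvInv_subset _ _ _ _ (by intro y hy; simp [hy]) hinv
      have hinvl : pvInv g vis (l1 ++ l2) :=
        pvInv_subset _ _ _ _ (fun y hy => hpermt.mem_iff.mpr hy) hinvt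
      by_cases hvx : pvVisN vis ex = true
      · rw [bfsA_vis _ _ _ _ _ _ _ hvx, bfsA_vis _ _ _ _ _ _ _ hvx]
        refine (IHK t.length (by simp at hK; omega)).2 g vis t (l1 ++ l2) num true hpre hlen
          hinvt hpermt hcf rfl
      · have hvx' : pvVisN vis ex = false := by simpa using hvx
        rw [bfsA_fresh _ _ _ _ _ _ _ hvx', bfsA_fresh _ _ _ _ _ _ _ hvx']
        have hrex : PySem.Raise.InRange vis.length ex := pvVisN_false_inrange vis ex hvx'
        have hcnt := pvFresh_count vis ex hvx'
        refine (IHcf ((PySem.List.pySetD vis ex true).count false) (by omega)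
          (t ++ pvExt g px ex).length).2 g _
          (t ++ pvExt g px ex) ((l1 ++ l2) ++ pvExt g px ex) (num + 1) cyc hpre
          (by rw [pvSetD_length]; exact hlen) ?_ (hpermt.append_right _) rfl rfl
        refine pvInv_append _ _ _ _ ?_ ?_
        · exact pvInv_mono _ _ _ _ (fun w h => pvVisN_pySetD_mono vis ex w h) hinvt
        · exact pvInv_ext g vis px ex hpre hlen (hlen ▸ hrex)

theorem dfsB_zero (g : List (List Int)) (p : Option Int) (e : Int) (vis : List Bool)
    (cnt : Int) (cyc : Bool) : dfsB g 0 p e vis cnt cyc = (vis, cnt, cyc) := by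
  rw [dfsB]

-- the DFS only marks vertices: length is preserved, the unvisited count never grows,
-- and visited vertices stay visited
theorem pvDfsInv : ∀ (fuel : Nat),
    (∀ (g : List (List Int)) (p : Option Int) (e : Int) (vis : List Bool) (cnt : Int)
        (cyc : Bool),
      (dfsB g fuel p e vis cnt cyc).1.length = vis.length ∧
      (dfsB g fuel p e vis cnt cyc).1.count false ≤ vis.count false ∧
      ∀ q, pvVisN vis q = true → pvVisN (dfsB g fuel p e vis cnt cyc).1 q = true)
    ∧ (∀ (g : List (List Int)) (p : Option Int) (e : Int) (kids : List Int) (vis : List Bool)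
        (cnt : Int) (cyc : Bool),
      (dfsKids g fuel p e kids vis cnt cyc).1.length = vis.length ∧
      (dfsKids g fuel p e kids vis cnt cyc).1.count false ≤ vis.count false ∧
      ∀ q, pvVisN vis q = true → pvVisN (dfsKids g fuel p e kids vis cnt cyc).1 q = true) := by
  intro fuel
  induction fuel with
  | zero =>
    constructor
    · intro g p e vis cnt cyc
      rw [dfsB_zero]
      exact ⟨rfl, le_refl _, fun q h => h⟩
    · intro g p e kids vis cnt cyc
      induction kids generalizing vis cnt cyc with
      | nil => rw [dfsKids_nil]; exact ⟨rfl, le_refl _, fun q h => h⟩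
      | cons c t iht =>
        by_cases hskip : some c = p
        · rw [dfsKids_skip _ _ _ _ _ _ _ _ _ hskip]; exact iht vis cnt cyc
        · by_cases hvc : pvVisN vis c = true
          · rw [dfsKids_vis _ _ _ _ _ _ _ _ _ hskip hvc]; exact iht vis cnt true
          · rw [dfsKids_rec _ _ _ _ _ _ _ _ _ hskip (by simpa using hvc)]
            simp only [dfsB_zero]
            exact iht vis cnt cyc
  | succ f ih =>
    have hB : ∀ (g : List (List Int)) (p : Option Int) (e : Int) (vis : List Bool) (cnt : Int)
        (cyc : Bool),
        (dfsB g (f + 1) p e vis cnt cyc).1.length = vis.length ∧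
        (dfsB g (f + 1) p e vis cnt cyc).1.count false ≤ vis.count false ∧
        ∀ q, pvVisN vis q = true → pvVisN (dfsB g (f + 1) p e vis cnt cyc).1 q = true := by
      intro g p e vis cnt cyc
      rw [dfsB_succ]
      obtain ⟨hl, hc, hm⟩ := ih.2 g p e ((PySem.List.pyGet? g e).getD [])
        (PySem.List.pySetD vis e true) (cnt + 1) cyc
      refine ⟨by rw [hl, pvSetD_length], le_trans hc (pvSetD_count_le vis e), ?_⟩
      intro q hq
      exact hm q (pvVisN_pySetD_mono vis e q hq)
    refine ⟨hB, ?_⟩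
    intro g p e kids vis cnt cyc
    induction kids generalizing vis cnt cyc with
    | nil => rw [dfsKids_nil]; exact ⟨rfl, le_refl _, fun q h => h⟩
    | cons c t iht =>
      by_cases hskip : some c = p
      · rw [dfsKids_skip _ _ _ _ _ _ _ _ _ hskip]; exact iht vis cnt cyc
      · by_cases hvc : pvVisN vis c = true
        · rw [dfsKids_vis _ _ _ _ _ _ _ _ _ hskip hvc]; exact iht vis cnt true
        · rw [dfsKids_rec _ _ _ _ _ _ _ _ _ hskip (by simpa using hvc)]
          obtain ⟨hl1, hc1, hm1⟩ := hB g (some e) c vis cnt cyc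
          obtain ⟨hl2, hc2, hm2⟩ := iht (dfsB g (f + 1) (some e) c vis cnt cyc).1
            (dfsB g (f + 1) (some e) c vis cnt cyc).2.1
            (dfsB g (f + 1) (some e) c vis cnt cyc).2.2
          exact ⟨by rw [hl2, hl1], le_trans hc2 hc1, fun q h => hm2 q (hm1 q h)⟩

-- the simulation: running A's BFS loop on (p,e)::rest equals running B's DFS from (p,e)
-- first and then the loop on rest
theorem pvSim : ∀ (cf : Nat) (g : List (List Int)) (fuel : Nat) (p : Option Int) (e : Int)
    (vis : List Bool) (num : Int) (cyc : Bool) (rest : List (Option Int × Int)),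
    Pre_can_remove g → vis.length = g.length → pvInv g vis ((p, e) :: rest) →
    pvVisN vis e = false → vis.count false ≤ fuel → vis.count false = cf →
    bfsA g ((p, e) :: rest) vis num cyc
      = bfsA g rest (dfsB g fuel p e vis num cyc).1 (dfsB g fuel p e vis num cyc).2.1
          (dfsB g fuel p e vis num cyc).2.2 := by
  intro cf
  induction cf using Nat.strong_induction_on with
  | _ cf IH =>
  intro g fuel p e vis num cyc rest hpre hlen hinv hve hfuel hcf
  have hcnt := pvFresh_count vis e hve
  have hre : PySem.Raise.InRange g.length e := hlen ▸ pvVisN_false_inrange vis e hve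
  obtain ⟨f, rfl⟩ : ∃ f, fuel = f + 1 := ⟨fuel - 1, by omega⟩
  rw [bfsA_fresh _ _ _ _ _ _ _ hve, dfsB_succ]
  have hlen' : (PySem.List.pySetD vis e true).length = g.length := by
    rw [pvSetD_length]; exact hlen
  have hmono : ∀ w, pvVisN vis w = true → pvVisN (PySem.List.pySetD vis e true) w = true :=
    fun w h => pvVisN_pySetD_mono vis e w h
  have hinvr : pvInv g (PySem.List.pySetD vis e true) rest :=
    pvInv_mono _ _ _ _ hmono (pvInv_subset _ _ _ _ (by intro y hy; simp [hy]) hinv)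
  have hinve : pvInv g (PySem.List.pySetD vis e true) (pvExt g p e) :=
    pvInv_ext g vis p e hpre hlen hre
  rw [(pvEP ((PySem.List.pySetD vis e true).count false) (rest ++ pvExt g p e).length).2
    g _ (rest ++ pvExt g p e) (pvExt g p e ++ rest) (num + 1) cyc hpre hlen'
    (pvInv_append _ _ _ _ hinvr hinve) List.perm_append_comm rfl rfl]
  have hvee : pvVisN (PySem.List.pySetD vis e true) e = true :=
    pvVisN_mark_self vis e (hlen ▸ hre)
  have kidsim : ∀ (L : List Int), (∀ c ∈ L, c ∈ (PySem.List.pyGet? g e).getD []) →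
      ∀ (vis2 : List Bool) (num2 : Int) (cyc2 : Bool),
      vis2.length = g.length → pvInv g vis2 rest → pvVisN vis2 e = true →
      vis2.count false < cf → vis2.count false ≤ f →
      bfsA g ((L.filter (fun c => !(some c == p))).map
          (fun c => ((some e : Option Int), c)) ++ rest) vis2 num2 cyc2
        = bfsA g rest (dfsKids g f p e L vis2 num2 cyc2).1
            (dfsKids g f p e L vis2 num2 cyc2).2.1 (dfsKids g f p e L vis2 num2 cyc2).2.2 := by
    intro L
    induction L with
    | nil =>
      intro _ vis2 num2 cyc2 _ _ _ _ _
      rw [dfsKids_nil]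
      simp
    | cons c t iht =>
      intro hsub vis2 num2 cyc2 hlen2 hinv2 hve2 hlt2 hle2
      have hcr : PySem.Raise.InRange g.length c := pvRow_range g e hpre hre c (hsub c (by simp))
      have hsubt : ∀ c' ∈ t, c' ∈ (PySem.List.pyGet? g e).getD [] :=
        fun c' h => hsub c' (by simp [h])
      by_cases hskip : some c = p
      · rw [dfsKids_skip _ _ _ _ _ _ _ _ _ hskip]
        have hdrop : (!(some c == p)) = false := by simp [hskip]
        simp only [List.filter_cons, hdrop, Bool.false_eq_true, if_false]
        exact iht hsubt vis2 num2 cyc2 hlen2 hinv2 hve2 hlt2 hle2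
      · have hkeep : (!(some c == p)) = true := by simp [hskip]
        by_cases hvc : pvVisN vis2 c = true
        · rw [dfsKids_vis _ _ _ _ _ _ _ _ _ hskip hvc]
          simp only [List.filter_cons, hkeep, if_true, List.map_cons, List.cons_append]
          rw [bfsA_vis _ _ _ _ _ _ _ hvc]
          exact iht hsubt vis2 num2 true hlen2 hinv2 hve2 hlt2 hle2
        · have hvc' : pvVisN vis2 c = false := by simpa using hvc
          rw [dfsKids_rec _ _ _ _ _ _ _ _ _ hskip hvc']
          simp only [List.filter_cons, hkeep, if_true, List.map_cons, List.cons_append]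
          have hinv3 : pvInv g vis2 (((some e : Option Int), c) ::
              ((t.filter (fun c => !(some c == p))).map
                (fun c => ((some e : Option Int), c)) ++ rest)) := by
            intro pr hm
            rcases List.mem_cons.mp hm with h | h
            · subst h
              refine ⟨hcr, ?_⟩
              intro w hw
              have hwe : w = e := by simpa using hw.symm
              rw [hwe]
              exact hve2
            · rcases List.mem_append.mp h with h | h
              · simp only [List.mem_map, List.mem_filter] at h
                obtain ⟨c', ⟨hc', -⟩, rfl⟩ := h
                refine ⟨pvRow_range g e hpre hre c' (hsubt c' hc'), ?_⟩
                intro w hw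
                have hwe : w = e := by simpa using hw.symm
                rw [hwe]
                exact hve2
              · exact hinv2 pr h
          rw [IH (vis2.count false) hlt2 g f (some e) c vis2 num2 cyc2 _ hpre hlen2 hinv3 hvc'
            hle2 rfl]
          obtain ⟨hl1, hc1, hm1⟩ := (pvDfsInv f).1 g (some e) c vis2 num2 cyc2
          exact iht hsubt _ _ _ (by rw [hl1]; exact hlen2)
            (pvInv_mono _ _ _ _ (fun w h => hm1 w h) hinv2)
            (hm1 e hve2) (lt_of_le_of_lt hc1 hlt2) (le_trans hc1 hle2)
  exact kidsim ((PySem.List.pyGet? g e).getD []) (fun c h => h)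
    (PySem.List.pySetD vis e true) (num + 1) cyc hlen' hinvr hvee (by omega) (by omega)


-- ===== VERDICT (by name: the statement is the Claim_ definition above) =====
theorem can_remove_spec : Claim_equal_can_remove := by
  intro graph hdom hpre
  unfold Spec_can_remove can_remove can_remove_alt
  by_cases h0 : graph.length = 0
  · simp [h0]
  · have hn : 0 < graph.length := Nat.pos_of_ne_zero h0
    simp only [h0, if_false]
    have hinv : pvInv graph (List.replicate graph.length false)
        [((none : Option Int), (0 : Int))] := by
      intro pr hm
      simp only [List.mem_singleton] at hm
      subst hm
      refine ⟨by simp [PySem.Raise.InRange]; omega, ?_⟩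
      intro w hw
      simp at hw
    have hve : pvVisN (List.replicate graph.length false) 0 = false := by
      have hr : PySem.Raise.InRange (List.replicate graph.length false).length 0 := by
        simp [PySem.Raise.InRange]
        omega
      rw [pvVisN_getElem _ _ hr]
      simp [pvNrm, hn]
    have hcnt : (List.replicate graph.length false).count false = graph.length := by simp
    have hsim := pvSim graph.length graph graph.length none 0
      (List.replicate graph.length false) 0 false [] hpre (by simp) hinv hve
      (by rw [hcnt]) hcnt
    rw [hsim, bfsA_nil]
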